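-- pv_equiv track=rewrite | github.com/Lekhakarthikeyan/AI-Internship-Domain-Recommender | app.py | recommend_domains
-- ===== SOURCE A (Python) =====
-- internship_domains = {
--     "Data Science": ["data", "machine learning", "statistics", "python", "analysis", "ai"],
--     "Web Development": ["html", "css", "javascript", "frontend", "backend", "react", "django", "flask"],
--     "Mobile Development": ["android", "ios", "flutter", "swift", "kotlin", "react native"],
--     "Cybersecurity": ["security", "network", "cryptography", "ethical hacking", "penetration testing"],
--     "Marketing": ["seo", "content", "digital marketing", "social media", "branding"],
--     "Finance": ["accounting", "financial analysis", "investment", "excel", "risk management"],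
--     "Design": ["ui", "ux", "graphic design", "photoshop", "illustrator", "adobe"],
-- }
--
-- def recommend_domains(interests, experience):
--     interests = interests.lower().split(',')
--     experience = experience.lower().split(',')
--     score_map = {domain: 0 for domain in internship_domains}
--
--     for domain, keywords in internship_domains.items():
--         for keyword in keywords:
--             if keyword.strip() in [i.strip() for i in interests] or keyword.strip() in [e.strip() for e in experience]:
--                 score_map[domain] += 1
--
--     sorted_domains = sorted(score_map.items(), key=lambda x: x[1], reverse=True)
--     recommendations = [d for d, score in sorted_domains if score > 0]
--
--     return recommendations if recommendations else ["General Internship Opportunities"]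
-- ===== SOURCE B (Python) =====
-- internship_domains = {
--     "Data Science": ["data", "machine learning", "statistics", "python", "analysis", "ai"],
--     "Web Development": ["html", "css", "javascript", "frontend", "backend", "react", "django", "flask"],
--     "Mobile Development": ["android", "ios", "flutter", "swift", "kotlin", "react native"],
--     "Cybersecurity": ["security", "network", "cryptography", "ethical hacking", "penetration testing"],
--     "Marketing": ["seo", "content", "digital marketing", "social media", "branding"],
--     "Finance": ["accounting", "financial analysis", "investment", "excel", "risk management"],
--     "Design": ["ui", "ux", "graphic design", "photoshop", "illustrator", "adobe"],
-- }
--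
--
-- def recommend_domains(interests, experience):
--     # Reverse index: stripped keyword -> domains whose keyword list contains it.
--     reverse_index = {}
--     for domain, keywords in internship_domains.items():
--         for kw in keywords:
--             reverse_index.setdefault(kw.strip(), []).append(domain)
--
--     # One deduplicated set of stripped tokens from both comma-split inputs.
--     tokens = {t.strip() for t in interests.lower().split(',')} | \
--              {t.strip() for t in experience.lower().split(',')}
--
--     score_map = {domain: 0 for domain in internship_domains}
--     for t in tokens:
--         for domain in reverse_index.get(t, []):
--             score_map[domain] += 1
--
--     sorted_domains = sorted(score_map.items(), key=lambda x: x[1], reverse=True)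
--     recommendations = [d for d, score in sorted_domains if score > 0]
--     return recommendations if recommendations else ["General Internship Opportunities"]
-- ===== Notes on version B (the rewrite author's own statement) =====
-- stated objective: alternative
-- what changed: B inverts the traversal: it precomputes a keyword->domain reverse index once, builds one deduplicated set of stripped lowered tokens from both inputs, and scores by looking each token up in the index, instead of A's per-domain loop that re-strips and scans both token lists for every keyword.
import Mathlib
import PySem

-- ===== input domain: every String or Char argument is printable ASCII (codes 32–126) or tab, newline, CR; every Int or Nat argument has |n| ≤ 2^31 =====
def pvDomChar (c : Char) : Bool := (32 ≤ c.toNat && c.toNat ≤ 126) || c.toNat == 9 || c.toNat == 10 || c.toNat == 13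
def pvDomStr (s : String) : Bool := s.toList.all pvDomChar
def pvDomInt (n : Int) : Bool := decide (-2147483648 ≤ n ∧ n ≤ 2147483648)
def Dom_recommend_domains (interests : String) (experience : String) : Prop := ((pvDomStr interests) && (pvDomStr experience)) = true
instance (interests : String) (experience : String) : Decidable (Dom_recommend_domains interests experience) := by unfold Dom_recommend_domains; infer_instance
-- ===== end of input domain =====

-- B replaces A's per-domain nested membership scans by a precomputed keyword→domain reverse
-- index driven by one deduplicated token set (objective: alternative decomposition).

-- ===== PORT A =====
def internshipDomains : List (String × List String) :=
  [("Data Science", ["data", "machine learning", "statistics", "python", "analysis", "ai"]),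
   ("Web Development", ["html", "css", "javascript", "frontend", "backend", "react", "django", "flask"]),
   ("Mobile Development", ["android", "ios", "flutter", "swift", "kotlin", "react native"]),
   ("Cybersecurity", ["security", "network", "cryptography", "ethical hacking", "penetration testing"]),
   ("Marketing", ["seo", "content", "digital marketing", "social media", "branding"]),
   ("Finance", ["accounting", "financial analysis", "investment", "excel", "risk management"]),
   ("Design", ["ui", "ux", "graphic design", "photoshop", "illustrator", "adobe"])]

-- s.split(',') with a non-empty separator (exact Python semantics via PySem.Chars.splitOn)
def pySplitComma (s : String) : List String :=
  (PySem.Chars.splitOn s.toList [',']).map String.ofList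

def scoreMapA (interests : String) (experience : String) : PySem.Dict String Int :=
  let ints := pySplitComma (PySem.Str.lower interests)
  let exps := pySplitComma (PySem.Str.lower experience)
  let score0 : PySem.Dict String Int :=
    internshipDomains.foldl (fun d p => d.insert p.1 0) PySem.Dict.empty
  internshipDomains.foldl (fun sm p =>
    p.2.foldl (fun sm kw =>
      if PySem.Str.strip kw ∈ ints.map (fun t => PySem.Str.strip t)
         ∨ PySem.Str.strip kw ∈ exps.map (fun t => PySem.Str.strip t)
      then sm.modify p.1 0 (· + 1) else sm) sm) score0

def recommend_domains (interests : String) (experience : String) : List String :=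
  let sorted_domains := PySem.List.sorted (scoreMapA interests experience).items (fun x => x.2) true
  let recommendations := (sorted_domains.filter (fun p => decide (p.2 > 0))).map (fun p => p.1)
  if recommendations.isEmpty then ["General Internship Opportunities"] else recommendations

-- ===== PORT B =====
-- reverse index: stripped keyword -> domains whose keyword list contains it (setdefault+append)
def reverseIndexB : PySem.Dict String (List String) :=
  internshipDomains.foldl (fun d p =>
    p.2.foldl (fun d kw => d.modify (PySem.Str.strip kw) [] (fun l => l ++ [p.1])) d)
    PySem.Dict.empty

def scoreMapB (interests : String) (experience : String) : PySem.Dict String Int :=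
  let tokens : PySem.Set String :=
    PySem.Set.union
      (PySem.Set.ofList ((pySplitComma (PySem.Str.lower interests)).map (fun t => PySem.Str.strip t)))
      (PySem.Set.ofList ((pySplitComma (PySem.Str.lower experience)).map (fun t => PySem.Str.strip t)))
  let score0 : PySem.Dict String Int :=
    internshipDomains.foldl (fun d p => d.insert p.1 0) PySem.Dict.empty
  tokens.foldl (fun sm t =>
    (reverseIndexB.getD t []).foldl (fun sm dom => sm.modify dom 0 (· + 1)) sm) score0

def recommend_domains_alt (interests : String) (experience : String) : List String :=
  let sorted_domains := PySem.List.sorted (scoreMapB interests experience).items (fun x => x.2) true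
  let recommendations := (sorted_domains.filter (fun p => decide (p.2 > 0))).map (fun p => p.1)
  if recommendations.isEmpty then ["General Internship Opportunities"] else recommendations

-- ===== PRECONDITION & SPEC =====
def Spec_recommend_domains (interests : String) (experience : String) (out : List String) : Prop := out = recommend_domains_alt interests experience
instance (interests : String) (experience : String) (out : List String) : Decidable (Spec_recommend_domains interests experience out) := by unfold Spec_recommend_domains; infer_instance

-- ===== CLAIM (what is proved, stated in full; the proofs are below) =====
def Claim_equal_recommend_domains : Prop := ∀ (interests : String) (experience : String), Dom_recommend_domains interests experience → Spec_recommend_domains interests experience (recommend_domains interests experience)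

-- ===== LEMMAS AND PROOFS =====

-- A's inner keyword loop: lookups at a key other than the loop's domain are untouched
theorem getD_innerA_ne (c : String → Prop) [DecidablePred c] (kws : List String)
    (dom k : String) (h : k ≠ dom) (sm : PySem.Dict String Int) :
    (kws.foldl (fun sm kw => if c kw then sm.modify dom 0 (· + 1) else sm) sm).getD k 0
      = sm.getD k 0 := by
  induction kws generalizing sm with
  | nil => rfl
  | cons kw kws ih =>
    simp only [List.foldl_cons]
    split
    · rw [ih, PySem.Dict.getD_modify_of_ne _ _ _ h]
    · exact ih sm

-- A's inner keyword loop adds the number of keywords satisfying the condition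
theorem getD_innerA_self (c : String → Prop) [DecidablePred c] (kws : List String)
    (dom : String) (sm : PySem.Dict String Int) :
    (kws.foldl (fun sm kw => if c kw then sm.modify dom 0 (· + 1) else sm) sm).getD dom 0
      = sm.getD dom 0 + ((kws.filter (fun kw => decide (c kw))).length : Int) := by
  induction kws generalizing sm with
  | nil => simp
  | cons kw kws ih =>
    simp only [List.foldl_cons, List.filter_cons]
    split
    · rw [ih, PySem.Dict.getD_modify_self]
      rw [if_pos (by simpa using ‹c kw›)]
      simp only [List.length_cons]
      push_cast; ring
    · rw [ih, if_neg (by simpa using ‹¬ c kw›)]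

theorem contains_innerA (c : String → Prop) [DecidablePred c] (kws : List String)
    (dom k : String) (sm : PySem.Dict String Int) (h : sm.contains k = true) :
    (kws.foldl (fun sm kw => if c kw then sm.modify dom 0 (· + 1) else sm) sm).contains k = true := by
  induction kws generalizing sm with
  | nil => exact h
  | cons kw kws ih =>
    simp only [List.foldl_cons]
    split
    · exact ih _ (by simp [PySem.Dict.contains_modify, h])
    · exact ih _ h

theorem keys_innerA (c : String → Prop) [DecidablePred c] (kws : List String)
    (dom : String) (sm : PySem.Dict String Int) (h : sm.contains dom = true) :
    (kws.foldl (fun sm kw => if c kw then sm.modify dom 0 (· + 1) else sm) sm).keys = sm.keys := by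
  induction kws generalizing sm with
  | nil => rfl
  | cons kw kws ih =>
    simp only [List.foldl_cons]
    split
    · rw [ih _ (by simp [PySem.Dict.contains_modify, h]),
        PySem.Dict.keys_modify, PySem.Dict.keys_insert_of_contains _ _ h]
    · exact ih _ h

-- A's whole double loop, lookup at k: the rows whose domain is k contribute their matching keywords
theorem getD_outerA (c : String → Prop) [DecidablePred c] (table : List (String × List String))
    (k : String) (sm : PySem.Dict String Int) :
    ((table.foldl (fun sm p =>
        p.2.foldl (fun sm kw => if c kw then sm.modify p.1 0 (· + 1) else sm) sm) sm).getD k 0)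
      = sm.getD k 0
        + (((table.filter (fun p => p.1 == k)).flatMap
             (fun p => p.2.filter (fun kw => decide (c kw)))).length : Int) := by
  induction table generalizing sm with
  | nil => simp
  | cons p table ih =>
    simp only [List.foldl_cons, List.filter_cons]
    by_cases hk : p.1 = k
    · subst hk
      rw [ih, getD_innerA_self]
      simp only [BEq.rfl, if_pos, List.flatMap_cons, List.length_append]
      push_cast; ring
    · rw [ih, getD_innerA_ne c _ _ _ (Ne.symm hk), if_neg (by simpa using hk)]

theorem keys_outerA (c : String → Prop) [DecidablePred c] (table : List (String × List String))
    (sm : PySem.Dict String Int) (h : ∀ p ∈ table, sm.contains p.1 = true) :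
    (table.foldl (fun sm p =>
        p.2.foldl (fun sm kw => if c kw then sm.modify p.1 0 (· + 1) else sm) sm) sm).keys = sm.keys := by
  induction table generalizing sm with
  | nil => rfl
  | cons p table ih =>
    simp only [List.foldl_cons]
    rw [ih _ (fun q hq => contains_innerA c _ _ _ _ (h q (List.mem_cons_of_mem _ hq))),
      keys_innerA c _ _ _ (h p (List.mem_cons_self ..))]

-- B's increment loop over keys already present leaves the key list unchanged
theorem keys_foldB (l : List String) (sm : PySem.Dict String Int)
    (h : ∀ x ∈ l, sm.contains x = true) :
    ((l.foldl (fun sm dom => sm.modify dom 0 (· + 1)) sm).keys) = sm.keys := by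
  induction l generalizing sm with
  | nil => rfl
  | cons x l ih =>
    simp only [List.foldl_cons]
    rw [ih _ (fun y hy => by simp [PySem.Dict.contains_modify, h y (List.mem_cons_of_mem _ hy)]),
      PySem.Dict.keys_modify, PySem.Dict.keys_insert_of_contains _ _ (h x (List.mem_cons_self ..))]

-- the reverse index, characterised as a filter of the flattened (stripped keyword, domain) table
theorem RI_getD_eq (t : String) :
    reverseIndexB.getD t []
      = ((internshipDomains.flatMap (fun p => p.2.map (fun kw => (PySem.Str.strip kw, p.1)))).filter
          (fun q => q.1 == t)).map (fun q => q.2) := by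
  have h : reverseIndexB
      = (internshipDomains.flatMap (fun p => p.2.map (fun kw => (PySem.Str.strip kw, p.1)))).foldl
          (fun d q => d.modify q.1 [] (fun l => l ++ [q.2])) PySem.Dict.empty := by
    unfold reverseIndexB
    rw [List.foldl_flatMap]
    congr 1
    funext d p
    rw [List.foldl_map]
  rw [h, PySem.Dict.getD_foldl_modify_append, PySem.Dict.getD_empty]
  simp

-- occurrences of a given domain in the reverse-index bucket of t = occurrences of t among its stripped keywords
theorem RI_count (p : String × List String) (hp : p ∈ internshipDomains) (t : String) :
    (reverseIndexB.getD t []).count p.1 = (p.2.map PySem.Str.strip).count t := by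
  rw [RI_getD_eq, List.count_eq_countP, List.countP_map, List.count_eq_countP, List.countP_map,
    List.countP_filter]
  fin_cases hp <;>
    simp [internshipDomains, List.countP_cons, Function.comp]

theorem mem_RI (t dom : String) (h : dom ∈ reverseIndexB.getD t []) :
    dom ∈ internshipDomains.map (fun p => p.1) := by
  rw [RI_getD_eq] at h
  obtain ⟨q, hq, rfl⟩ := List.mem_map.mp h
  obtain ⟨p, hp, hq2⟩ := List.mem_flatMap.mp (List.mem_filter.mp hq).1
  obtain ⟨kw, -, rfl⟩ := List.mem_map.mp hq2
  exact List.mem_map.mpr ⟨p, hp, rfl⟩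

theorem filter_mem_cons (L : List String) (t : String) (S : List String) (h : t ∉ S) :
    (L.filter (fun x => decide (x ∈ t :: S))).length
      = L.count t + (L.filter (fun x => decide (x ∈ S))).length := by
  induction L with
  | nil => simp
  | cons x L ih =>
    simp only [List.mem_cons, Bool.decide_or] at ih
    by_cases hx : x = t
    · subst hx
      have hxS : x ∉ S := h
      simp only [List.filter_cons, List.count_cons, List.mem_cons, Bool.decide_or]
      simp [hxS, ih]
      omega
    · simp only [List.filter_cons, List.count_cons, List.mem_cons, Bool.decide_or]
      by_cases hS : x ∈ S
      · simp [hx, hS]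
        omega
      · simpa [hx, hS] using ih

-- counting one value across the buckets of a nodup token list = matching tokens, counted via L
theorem count_flatMap_filter (g : String → List String) (k : String) (L : List String)
    (hg : ∀ t, (g t).count k = L.count t) :
    ∀ (S : List String), S.Nodup →
      ((S.flatMap g).count k) = (L.filter (fun x => decide (x ∈ S))).length := by
  intro S
  induction S with
  | nil => simp
  | cons t S ih =>
    intro hnd
    obtain ⟨ht, hnd⟩ := List.nodup_cons.mp hnd
    rw [List.flatMap_cons, List.count_append, hg, ih hnd, filter_mem_cons _ _ _ ht]

-- in a table with distinct domain names, filtering for the domain of a member row yields that row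
theorem filter_fst_eq (l : List (String × List String)) (hnd : (l.map (fun q => q.1)).Nodup)
    (p : String × List String) (hp : p ∈ l) : l.filter (fun q => q.1 == p.1) = [p] := by
  induction l with
  | nil => cases hp
  | cons q l ih =>
    simp only [List.map_cons, List.nodup_cons, List.mem_map] at hnd
    rcases List.mem_cons.mp hp with rfl | hp'
    · rw [List.filter_cons_of_pos (by simp)]
      have : l.filter (fun q => q.1 == p.1) = [] := by
        apply List.filter_eq_nil_iff.mpr
        intro a ha
        simp only [beq_iff_eq]
        exact fun hEq => hnd.1 ⟨a, ha, hEq⟩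
      rw [this]
    · have hq : q.1 ≠ p.1 := fun hEq => hnd.1 ⟨p, hp', hEq.symm⟩
      rw [List.filter_cons_of_neg (by simpa using hq), ih hnd.2 hp']

theorem keys_scoreMapA (interests experience : String) :
    (scoreMapA interests experience).keys = internshipDomains.map (fun p => p.1) := by
  rw [scoreMapA]
  rw [keys_outerA _ _ _ (by decide), (by decide : (internshipDomains.foldl (fun d p => d.insert p.1 0)
      (PySem.Dict.empty : PySem.Dict String Int)).keys = internshipDomains.map (fun p => p.1))]

theorem keys_scoreMapB (interests experience : String) :
    (scoreMapB interests experience).keys = internshipDomains.map (fun p => p.1) := by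
  rw [scoreMapB, ← List.foldl_flatMap, keys_foldB _ _ (by
      intro x hx
      obtain ⟨t, ht, hxt⟩ := List.mem_flatMap.mp hx
      exact (by decide : ∀ k ∈ internshipDomains.map (fun p => p.1),
        (internshipDomains.foldl (fun d p => d.insert p.1 0)
          (PySem.Dict.empty : PySem.Dict String Int)).contains k = true) x (mem_RI t x hxt)),
    (by decide : (internshipDomains.foldl (fun d p => d.insert p.1 0)
      (PySem.Dict.empty : PySem.Dict String Int)).keys = internshipDomains.map (fun p => p.1))]

theorem getD_scoreMaps_eq (interests experience : String) :
    ∀ k ∈ internshipDomains.map (fun p => p.1),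
      (scoreMapA interests experience).getD k 0 = (scoreMapB interests experience).getD k 0 := by
  intro k hk
  obtain ⟨p, hp, rfl⟩ := List.mem_map.mp hk
  rw [scoreMapA, getD_outerA, filter_fst_eq _ (by decide) _ hp]
  rw [scoreMapB, ← List.foldl_flatMap, PySem.Dict.getD_foldl_modify_add_one,
    count_flatMap_filter _ _ _ (fun t => RI_count p hp t) _
      (PySem.Set.nodup_union _ _ (PySem.Set.nodup_ofList _))]
  congr 1
  rw [Nat.cast_inj]
  simp only [List.flatMap_cons, List.flatMap_nil, List.append_nil]
  rw [List.filter_map, List.length_map]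
  refine congrArg List.length (List.filter_congr ?_)
  intro kw _
  simp only [Function.comp_apply]
  rw [decide_eq_decide, PySem.Set.mem_union]
  simp [PySem.Set.mem_ofList]

theorem scoreA_eq_scoreB (interests experience : String) :
    scoreMapA interests experience = scoreMapB interests experience := by
  apply PySem.Dict.ext
  rw [PySem.Dict.items_eq_map_keys _ (by rw [keys_scoreMapA]; decide) 0,
    PySem.Dict.items_eq_map_keys _ (by rw [keys_scoreMapB]; decide) 0,
    keys_scoreMapA, keys_scoreMapB]
  apply List.map_congr_left
  intro k hk
  rw [getD_scoreMaps_eq interests experience k hk]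

-- ===== VERDICT (by name: the statement is the Claim_ definition above) =====
theorem recommend_domains_spec : Claim_equal_recommend_domains := by
  intro interests experience _
  unfold Spec_recommend_domains recommend_domains recommend_domains_alt
  rw [scoreA_eq_scoreB]
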